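-- pv_equiv track=rewrite | github.com/AdamZhouSE/pythonHomework | Code/CodeRecords/2502/60759/293809.py | count
-- ===== SOURCE A (Python) =====
-- def count(nums):
--     idx = nums.index(max(nums))
--     ans = 0
--     if len(nums) == 1:
--         return 0
--     if idx + 1 < len(nums):
--         ans += nums[idx] + count(nums[idx + 1:])
--     if 0 <= idx - 1:
--         ans += nums[idx] + count(nums[:idx])
--     return ans
-- ===== SOURCE B (Python) =====
-- def count(nums):
--     ans = 0
--     st = []
--     for x in nums:
--         while st and st[-1] < x:
--             st.pop()
--             ans += min(st[-1], x) if st else x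
--         st.append(x)
--     for i in range(len(st) - 1):
--         ans += st[i]
--     return ans
-- ===== Notes on version B (the rewrite author's own statement) =====
-- stated objective: faster
-- what changed: Replaces A's recursive split-at-leftmost-max (which rescans each sublist with max/index/slicing) by a single left-to-right monotonic-stack pass that adds each tree edge's parent value as it is discovered.
import Mathlib
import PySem

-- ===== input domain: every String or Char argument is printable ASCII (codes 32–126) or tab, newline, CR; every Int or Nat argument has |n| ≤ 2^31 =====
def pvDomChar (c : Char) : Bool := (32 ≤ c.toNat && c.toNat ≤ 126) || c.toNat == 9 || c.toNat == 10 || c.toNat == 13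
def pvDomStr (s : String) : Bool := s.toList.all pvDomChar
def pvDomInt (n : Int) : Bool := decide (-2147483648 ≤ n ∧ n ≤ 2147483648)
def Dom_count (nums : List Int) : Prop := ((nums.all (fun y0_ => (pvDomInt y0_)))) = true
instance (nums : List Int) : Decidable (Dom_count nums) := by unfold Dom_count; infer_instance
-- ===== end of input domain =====

-- B replaces A's recursive split-at-leftmost-max (which rescans each sublist with
-- max/index/slicing) by a single left-to-right monotonic-stack pass; A raises
-- ValueError on [], which Pre_count excludes.


-- ===== PORT A =====
-- A: idx = nums.index(max(nums)); recurse on nums[idx+1:] and nums[:idx], adding nums[idx]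
-- for each nonempty side.  On [] Python's max raises ValueError (→ Pre_count).
def count (nums : List Int) : Int :=
  match hm : PySem.List.max? nums (fun y => y) with
  | none => 0
  | some m =>
    match hi : PySem.List.index? nums m with
    | none => 0
    | some idx =>
      if nums.length = 1 then 0
      else
        (if (idx : Int) + 1 < (nums.length : Int) then
           PySem.List.pyGetD nums (idx : Int) 0 +
             count (PySem.List.slice nums (some ((idx : Int) + 1)) none)
         else 0)
        +
        (if (0 : Int) ≤ (idx : Int) - 1 then
           PySem.List.pyGetD nums (idx : Int) 0 +
             count (PySem.List.slice nums none (some (idx : Int)))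
         else 0)
termination_by nums.length
decreasing_by
  · have hne : nums ≠ [] := by
      intro h; rw [h] at hm; rw [(PySem.List.max?_eq_none_iff [] (fun y : Int => y)).mpr rfl] at hm; cases hm
    rw [show ((idx : Int) + 1) = (((idx + 1 : Nat) : Int)) by push_cast; ring,
        PySem.List.slice_from_natCast]
    have : 0 < nums.length := List.length_pos_iff.mpr hne
    simp only [List.length_drop]; omega
  · rw [PySem.List.index?_eq_some_iff] at hi
    obtain ⟨pre, suf, hsplit, hpl, -⟩ := hi
    have hlen : idx < nums.length := by subst hsplit; simp [← hpl]
    rw [PySem.List.slice_to_natCast]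
    simp only [List.length_take]; omega


-- ===== PORT B =====
-- B keeps its stack top-at-head (Python appends at the end, so Python's st is the
-- reverse of this list); Python's trailing loop `for i in range(len(st)-1): ans += st[i]`
-- sums every stack entry except the top, i.e. the tail of this list.
-- inner loop: `while st and st[-1] < x: st.pop(); ans += min(st[-1], x) if st else x`
def popLoop (x : Int) : List Int → Int → Int × List Int
  | [], ans => (ans, [])
  | t :: rest, ans =>
    if t < x then
      match rest with
      | [] => popLoop x [] (ans + x)
      | u :: r => popLoop x (u :: r) (ans + min u x)
    else (ans, t :: rest)

-- one iteration of B's `for x in nums` loop on the state (ans, st)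
def stepB (p : Int × List Int) (x : Int) : Int × List Int :=
  let q := popLoop x p.2 p.1
  (q.1, x :: q.2)

def count_alt (nums : List Int) : Int :=
  let r := nums.foldl stepB (0, [])
  r.1 + r.2.tail.foldl (· + ·) 0

-- ===== PRECONDITION & SPEC =====
-- Pre_count: A calls max(nums), which raises ValueError on the empty list.
def Pre_count (nums : List Int) : Prop := nums ≠ []
instance (nums : List Int) : Decidable (Pre_count nums) := by unfold Pre_count; infer_instance
def pvWitness_count : List Int := [3, 1, 3, 2]

def Spec_count (nums : List Int) (out : Int) : Prop := out = count_alt nums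
instance (nums : List Int) (out : Int) : Decidable (Spec_count nums out) := by unfold Spec_count; infer_instance

-- ===== CLAIM (what is proved, stated in full; the proofs are below) =====
def Claim_equal_count : Prop := ∀ (nums : List Int), Dom_count nums → Pre_count nums → Spec_count nums (count nums)

-- ===== LEMMAS AND PROOFS =====

theorem popLoop_shift (x : Int) (s : List Int) (a c : Int) :
    popLoop x s (a + c) = ((popLoop x s a).1 + c, (popLoop x s a).2) := by
  induction s generalizing a with
  | nil => simp [popLoop]
  | cons t rest ih =>
    cases rest with
    | nil =>
      by_cases h : t < x <;> simp [popLoop, h]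
      ring
    | cons u r =>
      by_cases h : t < x <;> simp [popLoop, h]
      rw [show a + c + min u x = (a + min u x) + c by ring, ih]

theorem popLoop_stack_subset (x : Int) (s : List Int) (a : Int) :
    ∀ y ∈ (popLoop x s a).2, y ∈ s := by
  induction s generalizing a with
  | nil => simp [popLoop]
  | cons t rest ih =>
    cases rest with
    | nil =>
      by_cases h : t < x <;> simp [popLoop, h]
    | cons u r =>
      by_cases h : t < x <;> simp [popLoop, h]
      intro y hy
      have := ih (a + min u x) y hy
      simp at this ⊢; tauto

theorem foldl_add_init (l : List Int) (a : Int) :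
    l.foldl (· + ·) a = a + l.foldl (· + ·) 0 := by
  induction l generalizing a with
  | nil => simp
  | cons x t ih =>
    simp only [List.foldl_cons, zero_add]
    rw [ih (a + x), ih x]; ring

theorem popLoop_all_lt (x : Int) (s : List Int) (a : Int) (h : ∀ y ∈ s, y < x) :
    popLoop x s a =
      (a + s.tail.foldl (· + ·) 0 + (if s = [] then 0 else x), []) := by
  induction s generalizing a with
  | nil => simp [popLoop]
  | cons t rest ih =>
    have ht : t < x := h t (by simp)
    cases rest with
    | nil => simp [popLoop, ht]
    | cons u r =>
      have hu : u < x := h u (by simp)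
      have hrec := ih (a + min u x) (fun y hy => h y (by simp at hy ⊢; tauto))
      simp only [popLoop, ht, if_pos]
      rw [hrec]
      simp only [List.tail_cons, min_eq_left hu.le, List.foldl_cons, zero_add,
        reduceCtorEq, ite_false, foldl_add_init r u, Prod.mk.injEq, and_true]
      ring

theorem popLoop_shield (m x : Int) (hx : x ≤ m) (s : List Int) (a : Int)
    (hs : ∀ y ∈ s, y ≤ m) :
    popLoop x (s ++ [m]) a = ((popLoop x s a).1, (popLoop x s a).2 ++ [m]) := by
  induction s generalizing a with
  | nil => simp [popLoop, not_lt.mpr hx]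
  | cons t rest ih =>
    cases rest with
    | nil =>
      by_cases h : t < x <;>
        simp [popLoop, h, min_eq_right hx, not_lt.mpr hx]
    | cons u r =>
      by_cases h : t < x
      · simp only [List.cons_append, popLoop, h, if_pos]
        exact ih _ (fun y hy => hs y (by simp at hy ⊢; tauto))
      · simp [popLoop, h]

theorem foldl_stepB_shift (xs : List Int) (a c : Int) (s : List Int) :
    xs.foldl stepB (a + c, s) =
      ((xs.foldl stepB (a, s)).1 + c, (xs.foldl stepB (a, s)).2) := by
  induction xs generalizing a s with
  | nil => simp
  | cons x t ih =>
    simp only [List.foldl_cons, stepB, popLoop_shift]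
    exact ih _ _

theorem foldl_stepB_stack_mem (xs : List Int) (a : Int) (s : List Int) :
    ∀ y ∈ (xs.foldl stepB (a, s)).2, y ∈ s ∨ y ∈ xs := by
  induction xs generalizing a s with
  | nil => simp
  | cons x t ih =>
    intro y hy
    simp only [List.foldl_cons, stepB] at hy
    rcases ih _ _ y hy with h | h
    · rcases List.mem_cons.mp h with h | h
      · exact Or.inr (by simp [h])
      · exact Or.inl (popLoop_stack_subset x s a y h)
    · exact Or.inr (by simp [h])

theorem foldl_stepB_shield (m : Int) (xs : List Int) (hxs : ∀ y ∈ xs, y ≤ m) :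
    ∀ (a : Int) (s : List Int), (∀ y ∈ s, y ≤ m) →
      xs.foldl stepB (a, s ++ [m]) =
        ((xs.foldl stepB (a, s)).1, (xs.foldl stepB (a, s)).2 ++ [m]) := by
  induction xs with
  | nil => intro a s _; simp
  | cons x t ih =>
    intro a s hs
    have hx : x ≤ m := hxs x (by simp)
    simp only [List.foldl_cons, stepB, popLoop_shield m x hx s a hs]
    have hstk : ∀ y ∈ x :: (popLoop x s a).2, y ≤ m := by
      intro y hy
      rcases List.mem_cons.mp hy with h | h
      · simpa [h] using hx
      · exact hs y (popLoop_stack_subset x s a y h)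
    simpa using ih (fun y hy => hxs y (by simp [hy])) (popLoop x s a).1
      (x :: (popLoop x s a).2) hstk

theorem foldl_stepB_stack_ne_nil (xs : List Int) (a : Int) (s : List Int)
    (h : xs ≠ []) : (xs.foldl stepB (a, s)).2 ≠ [] := by
  induction xs generalizing a s with
  | nil => exact absurd rfl h
  | cons x t ih =>
    by_cases ht : t = []
    · subst ht; simp [stepB]
    · simp only [List.foldl_cons]
      exact ih _ _ ht

theorem count_alt_split (L R : List Int) (m : Int)
    (hL : ∀ y ∈ L, y < m) (hR : ∀ y ∈ R, y ≤ m) :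
    count_alt (L ++ m :: R) =
      (if L = [] then 0 else m + count_alt L) +
      (if R = [] then 0 else m + count_alt R) := by
  unfold count_alt
  simp only [List.foldl_append, List.foldl_cons]
  set pL := L.foldl stepB ((0 : Int), ([] : List Int)) with hpL
  have hsLlt : ∀ y ∈ pL.2, y < m := by
    intro y hy
    rcases foldl_stepB_stack_mem L 0 [] y hy with h | h
    · simp at h
    · exact hL y h
  have hstep : stepB pL m =
      (pL.1 + pL.2.tail.foldl (· + ·) 0 + (if pL.2 = [] then 0 else m), [m]) := by
    simp only [stepB, popLoop_all_lt m pL.2 pL.1 hsLlt]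
  rw [hstep]
  set A0 := pL.1 + pL.2.tail.foldl (· + ·) 0 + (if pL.2 = [] then 0 else m) with hA0
  have h1 : R.foldl stepB (A0, [m]) =
      ((R.foldl stepB (A0, [])).1, (R.foldl stepB (A0, [])).2 ++ [m]) := by
    simpa using foldl_stepB_shield m R hR A0 [] (by simp)
  have h2 : R.foldl stepB (A0, ([] : List Int)) =
      ((R.foldl stepB ((0 : Int), ([] : List Int))).1 + A0,
       (R.foldl stepB ((0 : Int), ([] : List Int))).2) := by
    simpa using foldl_stepB_shift R 0 A0 []
  rw [h1, h2]
  set pR := R.foldl stepB ((0 : Int), ([] : List Int)) with hpR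
  by_cases hLnil : L = []
  · have hpL0 : pL = (0, []) := by simp [hpL, hLnil]
    have hA00 : A0 = 0 := by simp [hA0, hpL0]
    by_cases hRnil : R = []
    · have hpR0 : pR = (0, []) := by simp [hpR, hRnil]
      simp [hLnil, hRnil, hpR0, hA00]
    · have hsR : pR.2 ≠ [] := foldl_stepB_stack_ne_nil R 0 [] hRnil
      obtain ⟨h, t, hht⟩ : ∃ h t, pR.2 = h :: t := by
        cases hc : pR.2 with
        | nil => exact absurd hc hsR
        | cons h t => exact ⟨h, t, rfl⟩
      simp only [hLnil, hRnil, if_pos, if_neg, ite_true, ite_false, hA00, hht,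
        List.cons_append, List.tail_cons, List.foldl_append, List.foldl_cons,
        List.foldl_nil]
      ring
  · have hsL : pL.2 ≠ [] := foldl_stepB_stack_ne_nil L 0 [] hLnil
    have hA0v : A0 = pL.1 + List.foldl (· + ·) 0 pL.2.tail + m := by
      rw [hA0, if_neg hsL]
    by_cases hRnil : R = []
    · have hpR0 : pR = (0, []) := by simp [hpR, hRnil]
      simp only [hLnil, hRnil, if_pos, if_neg, ite_true, ite_false, hpR0, hA0v]
      simp [count_alt, ← hpL]
      ring
    · have hsR : pR.2 ≠ [] := foldl_stepB_stack_ne_nil R 0 [] hRnil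
      obtain ⟨h, t, hht⟩ : ∃ h t, pR.2 = h :: t := by
        cases hc : pR.2 with
        | nil => exact absurd hc hsR
        | cons h t => exact ⟨h, t, rfl⟩
      simp only [hLnil, hRnil, if_neg, ite_false, hA0v, hht,
        List.cons_append, List.tail_cons, List.foldl_append, List.foldl_cons,
        List.foldl_nil]
      ring

theorem count_eq_alt : ∀ (n : Nat) (nums : List Int), nums.length ≤ n → nums ≠ [] →
    count nums = count_alt nums := by
  intro n
  induction n with
  | zero =>
    intro nums hlen hne
    cases nums with
    | nil => exact absurd rfl hne
    | cons a t => simp at hlen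
  | succ n ih =>
    intro nums hlen hne
    obtain ⟨m, hm⟩ : ∃ m, PySem.List.max? nums (fun y => y) = some m := by
      cases hmax : PySem.List.max? nums (fun y => y) with
      | none => exact absurd ((PySem.List.max?_eq_none_iff _ _).mp hmax) hne
      | some m => exact ⟨m, rfl⟩
    have hmax : ∀ y ∈ nums, y ≤ m := fun y hy => PySem.List.max?_isMax hm y hy
    obtain ⟨idx, hi⟩ : ∃ idx, PySem.List.index? nums m = some idx := by
      have : m ∈ nums := PySem.List.max?_mem hm
      cases hc : PySem.List.index? nums m with
      | none => exact absurd ((PySem.List.index?_eq_none_iff _ _).mp hc) (by simpa using this)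
      | some k => exact ⟨k, rfl⟩
    have hi' := hi
    rw [PySem.List.index?_eq_some_iff] at hi'
    obtain ⟨pre, suf, hsplit, hpl, hmnot⟩ := hi'
    have hLlt : ∀ y ∈ pre, y < m := by
      intro y hy
      have hle : y ≤ m := hmax y (by rw [hsplit]; exact List.mem_append_left _ hy)
      rcases lt_or_eq_of_le hle with h | h
      · exact h
      · exact absurd (h ▸ hy) hmnot
    have hRle : ∀ y ∈ suf, y ≤ m := by
      intro y hy
      exact hmax y (by rw [hsplit]; exact List.mem_append_right _ (by simp [hy]))
    have hlennums : nums.length = pre.length + 1 + suf.length := by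
      rw [hsplit]; simp; omega
    -- unfold A one step
    rw [count.eq_def]
    split
    · next hm' => rw [hm] at hm'; cases hm'
    next m' hm' =>
    rw [hm] at hm'; cases hm'
    split
    · next hi2 => rw [hi] at hi2; cases hi2
    next idx' hi2 =>
    rw [hi] at hi2; cases hi2
    -- getD and slices
    have hget : PySem.List.pyGetD nums (idx : Int) 0 = m := by
      rw [PySem.List.pyGetD_natCast, hsplit, ← hpl]
      rw [List.getD_eq_getElem?_getD, List.getElem?_append_right le_rfl]
      simp
    have hdrop : PySem.List.slice nums (some ((idx : Int) + 1)) none = suf := by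
      rw [show ((idx : Int) + 1) = (((idx + 1 : Nat) : Int)) by push_cast; ring,
          PySem.List.slice_from_natCast, hsplit, ← hpl]
      rw [show pre ++ m :: suf = (pre ++ [m]) ++ suf by simp,
          show pre.length + 1 = (pre ++ [m]).length by simp, List.drop_left]
    have htake : PySem.List.slice nums none (some (idx : Int)) = pre := by
      rw [PySem.List.slice_to_natCast, hsplit, ← hpl, List.take_left]
    rw [hget, hdrop, htake]
    -- B side
    have hB := count_alt_split pre suf m hLlt hRle
    rw [hsplit, hB]
    have hsuflen : suf.length ≤ n := by omega
    have hprelen : pre.length ≤ n := by omega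
    by_cases hpre : pre = [] <;> by_cases hsuf : suf = []
    · subst hpre; subst hsuf; simp
    · -- pre = [], suf ≠ []
      subst hpre
      have h0 : idx = 0 := by simpa using hpl.symm
      have hsl : 0 < suf.length := List.length_pos_iff.mpr hsuf
      subst h0
      rw [ih suf hsuflen hsuf]
      simp only [List.nil_append, List.length_cons, Nat.cast_zero]
      rw [if_neg (by first | (push_cast; simp; omega) | (push_cast; simp) | (push_cast; omega) | omega | simp | (simp [hlennums] at *; omega)), if_pos (by first | (push_cast; simp; omega) | (push_cast; simp) | (push_cast; omega) | omega | simp | (simp [hlennums] at *; omega)), if_neg (by first | (push_cast; simp; omega) | (push_cast; simp) | (push_cast; omega) | omega | simp | (simp [hlennums] at *; omega))]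
      simp [hsuf]
    · -- pre ≠ [], suf = []
      subst hsuf
      have hpl' : idx = pre.length := hpl.symm
      have hplpos : 0 < pre.length := List.length_pos_iff.mpr hpre
      subst hpl'
      rw [ih pre hprelen hpre]
      rw [if_neg (by first | (push_cast; simp; omega) | (push_cast; simp) | (push_cast; omega) | omega | simp | (simp [hlennums] at *; omega)),
          if_neg (by first | (push_cast; simp; omega) | (push_cast; simp) | (push_cast; omega) | omega | simp | (simp [hlennums] at *; omega)),
          if_pos (by first | (push_cast; simp; omega) | (push_cast; simp) | (push_cast; omega) | omega | simp | (simp [hlennums] at *; omega))]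
      simp [hpre]
    · -- both nonempty
      have hpl' : idx = pre.length := hpl.symm
      have hplpos : 0 < pre.length := List.length_pos_iff.mpr hpre
      have hsl : 0 < suf.length := List.length_pos_iff.mpr hsuf
      subst hpl'
      rw [ih pre hprelen hpre, ih suf hsuflen hsuf]
      rw [if_neg (by first | (push_cast; simp; omega) | (push_cast; simp) | (push_cast; omega) | omega | simp | (simp [hlennums] at *; omega)),
          if_pos (by first | (push_cast; simp; omega) | (push_cast; simp) | (push_cast; omega) | omega | simp | (simp [hlennums] at *; omega)),
          if_pos (by first | (push_cast; simp; omega) | (push_cast; simp) | (push_cast; omega) | omega | simp | (simp [hlennums] at *; omega))]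
      simp [hpre, hsuf]
      ring

-- ===== VERDICT =====
theorem count_spec : Claim_equal_count := by
  intro nums _ hpre
  unfold Spec_count
  exact count_eq_alt nums.length nums le_rfl hpre
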